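-- pv_equiv track=rewrite | github.com/miiiingi/ps | programmers/코딩테스트연습/연습문제/귤고르기.py | solution
-- ===== SOURCE A (Python) =====
-- import collections
--
-- def solution(k, tangerine):
--     answer = []
--     sorted_dict = dict(sorted(collections.Counter(
--         tangerine).items(), key=lambda item: item[1], reverse=True))
--     for key, value in sorted_dict.items():
--         if k <= 0:
--             return len(set(answer))
--         if k < value:
--             k -= value
--             answer.append(key)
--             continue
--         k -= value
--         answer.append(key)
--     else:
--         return len(set(answer))
-- ===== SOURCE B (Python) =====
-- def solution(k, tangerine):
--     cnt = {}
--     for t in tangerine: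
--         cnt[t] = cnt.get(t, 0) + 1
--     n = len(tangerine)
--     bucket = [0] * (n + 1)
--     for c in cnt.values():
--         bucket[c] += 1
--     taken = 0
--     for f in range(n, 0, -1):
--         b = bucket[f]
--         while b > 0 and k > 0:
--             k -= f
--             taken += 1
--             b -= 1
--     return taken
-- ===== Notes on version B (the rewrite author's own statement) =====
-- stated objective: faster
-- what changed: B replaces A's comparison sort of the Counter items (plus per-step set bookkeeping) by an O(n) counting/bucket sort on the frequencies followed by the same greedy take of largest frequencies first.
import Mathlib
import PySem

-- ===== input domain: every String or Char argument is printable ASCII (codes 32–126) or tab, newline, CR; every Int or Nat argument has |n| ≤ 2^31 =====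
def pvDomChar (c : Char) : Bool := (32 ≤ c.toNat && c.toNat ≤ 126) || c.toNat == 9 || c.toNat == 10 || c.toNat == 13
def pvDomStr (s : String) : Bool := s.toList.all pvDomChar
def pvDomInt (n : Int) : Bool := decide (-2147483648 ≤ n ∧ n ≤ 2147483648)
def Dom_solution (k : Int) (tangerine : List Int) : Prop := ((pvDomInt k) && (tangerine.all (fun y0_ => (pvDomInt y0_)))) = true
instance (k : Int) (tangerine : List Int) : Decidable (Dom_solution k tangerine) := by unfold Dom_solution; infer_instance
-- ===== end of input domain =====

-- B replaces A's comparison sort of the Counter items by a counting (bucket) sort on the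
-- frequencies followed by the same greedy take, an asymptotically different algorithm.
-- Both programs only read their arguments; no observable mutation.

-- ===== PORT A =====
-- the for-loop over sorted_dict.items() with its early return and for-else
def pvLoopA (k : Int) (answer : List Int) (items : List (Int × Int)) : Int :=
  match items with
  | [] => ((PySem.Set.ofList answer).length : Int)                 -- for-else: return len(set(answer))
  | (key, value) :: rest =>
    if k ≤ 0 then ((PySem.Set.ofList answer).length : Int)         -- if k <= 0: return len(set(answer))
    else if k < value then pvLoopA (k - value) (answer ++ [key]) rest   -- k -= value; answer.append(key); continue
    else pvLoopA (k - value) (answer ++ [key]) rest                -- k -= value; answer.append(key)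

def solution (k : Int) (tangerine : List Int) : Int :=
  let sortedItems := PySem.List.sorted (PySem.Dict.counter tangerine).items (fun item => item.2) true
  let sorted_dict := PySem.Dict.ofList sortedItems
  pvLoopA k [] sorted_dict.items

-- ===== PORT B =====
-- while b > 0 and k > 0: k -= f; taken += 1; b -= 1
def pvInner (f : Int) (b : Int) (k : Int) (taken : Int) : Int × Int :=
  if h : 0 < b ∧ 0 < k then pvInner f (b - 1) (k - f) (taken + 1) else (k, taken)
termination_by b.toNat
decreasing_by omega

def solution_alt (k : Int) (tangerine : List Int) : Int :=
  let cnt := tangerine.foldl (fun d t => d.insert t (d.getD t 0 + 1)) PySem.Dict.empty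
  let n : Int := tangerine.length
  -- bucket[c] += 1: every count c satisfies 1 ≤ c ≤ n, so indexing by c.toNat is exact here
  let bucket := cnt.values.foldl (fun b c => b.set c.toNat (PySem.List.pyGetD b c 0 + 1))
                  (PySem.List.pyRepeat [(0 : Int)] (n + 1))
  let st := (PySem.List.pyRange n 0 (-1)).foldl
      (fun (st : Int × Int) f => pvInner f (PySem.List.pyGetD bucket f 0) st.1 st.2) (k, 0)
  st.2

-- ===== PRECONDITION & SPEC =====
def Spec_solution (k : Int) (tangerine : List Int) (out : Int) : Prop := out = solution_alt k tangerine
instance (k : Int) (tangerine : List Int) (out : Int) : Decidable (Spec_solution k tangerine out) := by unfold Spec_solution; infer_instance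

-- ===== CLAIM (what is proved, stated in full; the proofs are below) =====
def Claim_equal_solution : Prop := ∀ (k : Int) (tangerine : List Int), Dom_solution k tangerine → Spec_solution k tangerine (solution k tangerine)

-- ===== LEMMAS AND PROOFS =====

-- the shared greedy core: consume counts in the given order while k > 0; return (final k, #taken)
def pvSteps : Int → List Int → Int × Int
  | k, [] => (k, 0)
  | k, c :: cs => if k ≤ 0 then (k, 0) else
      ((pvSteps (k - c) cs).1, (pvSteps (k - c) cs).2 + 1)

theorem pvSteps_nonpos (k : Int) (l : List Int) (h : k ≤ 0) : pvSteps k l = (k, 0) := by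
  cases l <;> simp [pvSteps, h]

theorem pvSteps_append (k : Int) (l1 l2 : List Int) :
    pvSteps k (l1 ++ l2) =
      ((pvSteps (pvSteps k l1).1 l2).1,
       (pvSteps k l1).2 + (pvSteps (pvSteps k l1).1 l2).2) := by
  induction l1 generalizing k with
  | nil => simp [pvSteps]
  | cons c cs ih =>
    by_cases h : k ≤ 0
    · simp [pvSteps, h, pvSteps_nonpos _ l2 h]
    · simp [pvSteps, h, ih]; omega

theorem pvLoopA_eq (items : List (Int × Int)) (k : Int) (answer : List Int)
    (h : (answer ++ items.map Prod.fst).Nodup) :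
    pvLoopA k answer items = (answer.length : Int) + (pvSteps k (items.map Prod.snd)).2 := by
  induction items generalizing k answer with
  | nil =>
    simp at h
    simp [pvLoopA, pvSteps, PySem.Set.ofList_eq_self_of_nodup _ h]
  | cons p rest ih =>
    obtain ⟨key, value⟩ := p
    by_cases hk : k ≤ 0
    · have ha : answer.Nodup := h.of_append_left
      simp [pvLoopA, pvSteps, hk, PySem.Set.ofList_eq_self_of_nodup _ ha]
    · have h' : ((answer ++ [key]) ++ rest.map Prod.fst).Nodup := by
        simpa [List.append_assoc] using h
      have := ih (k - value) (answer ++ [key]) h'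
      simp [pvLoopA, hk, this, pvSteps]
      ring

theorem pvInner_eq (f b k taken : Int) :
    pvInner f b k taken =
      ((pvSteps k (List.replicate b.toNat f)).1,
       taken + (pvSteps k (List.replicate b.toNat f)).2) := by
  induction b, k, taken using pvInner.induct f with
  | case1 b k taken h ih =>
    have hb : b.toNat = (b - 1).toNat + 1 := by omega
    rw [pvInner, dif_pos h, ih, hb, List.replicate_succ]
    have hk : ¬ k ≤ 0 := by omega
    simp [pvSteps, hk]
    ring
  | case2 b k taken h =>
    rw [pvInner, dif_neg h]
    by_cases hb : 0 < b
    · have hk : k ≤ 0 := by omega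
      simp [pvSteps_nonpos _ _ hk]
    · have : b.toNat = 0 := by omega
      simp [this, pvSteps]

theorem pvOuter_eq (fs : List Int) (bucket : List Int) (k taken : Int) :
    fs.foldl (fun (st : Int × Int) f => pvInner f (PySem.List.pyGetD bucket f 0) st.1 st.2) (k, taken)
      = ((pvSteps k (fs.flatMap (fun f => List.replicate (PySem.List.pyGetD bucket f 0).toNat f))).1,
         taken + (pvSteps k (fs.flatMap (fun f => List.replicate (PySem.List.pyGetD bucket f 0).toNat f))).2) := by
  induction fs generalizing k taken with
  | nil => simp [pvSteps]
  | cons f fs ih =>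
    rw [List.foldl_cons, pvInner_eq, ih, List.flatMap_cons, pvSteps_append]
    refine Prod.ext rfl ?_
    simp; ring

-- bucket-building fold: each in-range cell ends at its start value plus the count
theorem pvBucketGetD (vs : List Int) (b : List Int) (f : Int)
    (hvs : ∀ v ∈ vs, 0 < v ∧ v.toNat < b.length)
    (hf0 : 0 ≤ f) (hfl : f.toNat < b.length) :
    PySem.List.pyGetD (vs.foldl (fun b c => b.set c.toNat (PySem.List.pyGetD b c 0 + 1)) b) f 0
      = PySem.List.pyGetD b f 0 + (vs.count f : Int) := by
  induction vs generalizing b with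
  | nil => simp
  | cons c vs ih =>
    obtain ⟨hc0, hcl⟩ := hvs c (by simp)
    rw [List.foldl_cons,
      ih _ (fun v hv => by
        have := hvs v (by simp [hv]); simpa using this) (by simpa using hfl)]
    have hfl' : f < (b.length : Int) := by omega
    rw [PySem.List.pyGetD_eq_getElem _ _ hf0 (by simpa using hfl'),
        PySem.List.pyGetD_eq_getElem _ _ hf0 (by exact_mod_cast hfl'),
        PySem.List.pyGetD_eq_getElem b _ (le_of_lt hc0) (by omega)]
    simp only [List.getElem_set, List.count_cons]
    by_cases hcf : c = f
    · subst hcf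
      simp
      omega
    · have : ¬ c.toNat = f.toNat := by omega
      simp [this, hcf]

-- count of any element in a bucket-expansion flatMap over distinct frequencies
theorem pvFlatCount (fs : List Int) (g : Int → Nat) (x : Int) (h : fs.Nodup) :
    (fs.flatMap (fun f => List.replicate (g f) f)).count x = if x ∈ fs then g x else 0 := by
  induction fs with
  | nil => simp
  | cons f fs ih =>
    simp only [List.flatMap_cons, List.count_append, List.count_replicate,
      List.nodup_cons] at *
    by_cases hxf : x = f
    · subst hxf
      simp [h.1, ih h.2]
    · simp [hxf, Ne.symm hxf, ih h.2]

-- the bucket expansion over strictly decreasing frequencies is non-increasing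
theorem pvFlatPairwise (fs : List Int) (g : Int → Nat) (h : fs.Pairwise (· > ·)) :
    (fs.flatMap (fun f => List.replicate (g f) f)).Pairwise (fun a b : Int => b ≤ a) := by
  induction fs with
  | nil => simp
  | cons f fs ih =>
    rw [List.pairwise_cons] at h
    rw [List.flatMap_cons, List.pairwise_append]
    refine ⟨?_, ih h.2, ?_⟩
    · exact List.pairwise_replicate.2 (Or.inr le_rfl)
    · intro a ha b hb
      have ha' : a = f := List.eq_of_mem_replicate ha
      obtain ⟨f2, hf2, hb'⟩ := List.mem_flatMap.1 hb
      have hb'' : b = f2 := List.eq_of_mem_replicate hb'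
      subst ha' hb''
      exact le_of_lt (h.1 _ hf2)

-- ===== VERDICT (by name: the statement is the Claim_ definition above) =====
theorem solution_spec : Claim_equal_solution := by
  intro k xs _
  show solution k xs = solution_alt k xs
  -- names for the pieces
  have hitems2 : ((PySem.Dict.counter xs).items.map Prod.fst).Nodup := by
    have := PySem.Dict.nodup_keys_counter xs
    simpa [PySem.Dict.keys] using this
  have hsp := PySem.List.sorted_perm (PySem.Dict.counter xs).items (fun item => item.2) true
  have hkeys : ((PySem.List.sorted (PySem.Dict.counter xs).items (fun item => item.2) true).map Prod.fst).Nodup :=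
    (hsp.map Prod.fst).nodup_iff.mpr hitems2
  -- A side: dict(sorted_items).items() is sorted_items, and the loop is pvSteps on its values
  have hofl : (PySem.Dict.ofList (PySem.List.sorted (PySem.Dict.counter xs).items (fun item => item.2) true)).items
      = PySem.List.sorted (PySem.Dict.counter xs).items (fun item => item.2) true := by
    simp only [PySem.Dict.ofList, PySem.Dict.update]
    rw [PySem.Dict.items_foldl_insert_fresh] <;> simp [hkeys, PySem.Dict.empty]
  have hA : solution k xs =
      (pvSteps k ((PySem.List.sorted (PySem.Dict.counter xs).items (fun item => item.2) true).map Prod.snd)).2 := by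
    simp only [solution]
    rw [hofl, pvLoopA_eq _ k [] (by simpa using hkeys)]
    simp
  -- B side
  have hcnt := PySem.Dict.foldl_insert_getD_add_one_eq_counter (κ := Int) xs
  have hvs_eq : (PySem.Dict.counter xs).values
      = (PySem.Set.ofList xs).map (fun t => (List.count t xs : Int)) := by
    simp [PySem.Dict.values, PySem.Dict.items_counter]
  have hmem : ∀ v ∈ (PySem.Dict.counter xs).values, 0 < v ∧ v ≤ (xs.length : Int) := by
    intro v hv
    rw [hvs_eq] at hv
    obtain ⟨t, ht, rfl⟩ := List.mem_map.1 hv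
    have ht' : t ∈ xs := (PySem.Set.mem_ofList _ _).1 ht
    constructor
    · exact_mod_cast List.count_pos_iff.2 ht'
    · exact_mod_cast List.count_le_length
  have hrep : PySem.List.pyRepeat [(0:Int)] ((xs.length : Int) + 1)
      = List.replicate (xs.length + 1) (0:Int) := by
    rw [PySem.List.pyRepeat_singleton]
    norm_num
  have hbget : ∀ f : Int, 0 < f → f ≤ (xs.length : Int) →
      PySem.List.pyGetD ((PySem.Dict.counter xs).values.foldl
        (fun b c => b.set c.toNat (PySem.List.pyGetD b c 0 + 1))
        (List.replicate (xs.length + 1) (0:Int))) f 0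
      = ((PySem.Dict.counter xs).values.count f : Int) := by
    intro f hf1 hf2
    rw [pvBucketGetD _ _ _
      (fun v hv => by have := hmem v hv; simp only [List.length_replicate]; omega)
      (le_of_lt hf1) (by simp; omega)]
    rw [PySem.List.pyGetD_eq_getElem _ _ (le_of_lt hf1) (by simp; omega)]
    simp
  have hnodup : (PySem.List.pyRange (xs.length : Int) 0 (-1)).Nodup := by
    rw [PySem.List.pyRange_neg_one_eq_reverse]
    exact List.nodup_reverse.2 (PySem.List.nodup_pyRange_one _ _)
  have hds_count : ∀ x : Int,
      ((PySem.List.pyRange (xs.length : Int) 0 (-1)).flatMap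
        (fun f => List.replicate (PySem.List.pyGetD ((PySem.Dict.counter xs).values.foldl
          (fun b c => b.set c.toNat (PySem.List.pyGetD b c 0 + 1))
          (List.replicate (xs.length + 1) (0:Int))) f 0).toNat f)).count x
      = (PySem.Dict.counter xs).values.count x := by
    intro x
    rw [pvFlatCount _ _ _ hnodup]
    by_cases hx : x ∈ PySem.List.pyRange (xs.length : Int) 0 (-1)
    · obtain ⟨hx1, hx2⟩ := PySem.List.mem_pyRange_neg_one.1 hx
      rw [if_pos hx, hbget x hx1 hx2]
      simp
    · rw [if_neg hx]
      symm
      rw [List.count_eq_zero]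
      intro hxm
      exact hx (PySem.List.mem_pyRange_neg_one.2 ⟨(hmem x hxm).1, (hmem x hxm).2⟩)
  have hgt : (PySem.List.pyRange (xs.length : Int) 0 (-1)).Pairwise (· > ·) := by
    rw [PySem.List.pyRange_neg_one_eq_reverse]
    exact List.pairwise_reverse.2 (PySem.List.pairwise_lt_pyRange_one _ _)
  have hpw_ds := pvFlatPairwise _
      (fun f => (PySem.List.pyGetD ((PySem.Dict.counter xs).values.foldl
        (fun b c => b.set c.toNat (PySem.List.pyGetD b c 0 + 1))
        (List.replicate (xs.length + 1) (0:Int))) f 0).toNat) hgt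
  have hperm : ((PySem.List.pyRange (xs.length : Int) 0 (-1)).flatMap
        (fun f => List.replicate (PySem.List.pyGetD ((PySem.Dict.counter xs).values.foldl
          (fun b c => b.set c.toNat (PySem.List.pyGetD b c 0 + 1))
          (List.replicate (xs.length + 1) (0:Int))) f 0).toNat f)).Perm
      (PySem.Dict.counter xs).values :=
    List.perm_iff_count.2 (fun a => by rw [hds_count a])
  have hvals_perm : ((PySem.List.sorted (PySem.Dict.counter xs).items (fun item => item.2) true).map Prod.snd).Perm
      (PySem.Dict.counter xs).values := by
    simpa [PySem.Dict.values] using hsp.map Prod.snd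
  have hpw_vals : ((PySem.List.sorted (PySem.Dict.counter xs).items (fun item => item.2) true).map Prod.snd).Pairwise
      (fun a b : Int => b ≤ a) := by
    have := PySem.List.sorted_pairwise_rev (PySem.Dict.counter xs).items (fun item => item.2)
    exact List.pairwise_map.2 this
  have heq : (PySem.List.sorted (PySem.Dict.counter xs).items (fun item => item.2) true).map Prod.snd
      = (PySem.List.pyRange (xs.length : Int) 0 (-1)).flatMap
        (fun f => List.replicate (PySem.List.pyGetD ((PySem.Dict.counter xs).values.foldl
          (fun b c => b.set c.toNat (PySem.List.pyGetD b c 0 + 1))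
          (List.replicate (xs.length + 1) (0:Int))) f 0).toNat f) := by
    rw [← List.reverse_inj]
    refine PySem.List.eq_of_perm_of_pairwise_le_of_injective (fun x : Int => x)
      (fun a b h => h) ?_ ?_ ?_
    · exact ((List.reverse_perm _).trans ((hvals_perm.trans hperm.symm).trans (List.reverse_perm _).symm))
    · exact List.pairwise_reverse.2 hpw_vals
    · exact List.pairwise_reverse.2 hpw_ds
  have hB : solution_alt k xs =
      (pvSteps k ((PySem.List.pyRange (xs.length : Int) 0 (-1)).flatMap
        (fun f => List.replicate (PySem.List.pyGetD ((PySem.Dict.counter xs).values.foldl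
          (fun b c => b.set c.toNat (PySem.List.pyGetD b c 0 + 1))
          (List.replicate (xs.length + 1) (0:Int))) f 0).toNat f))).2 := by
    simp only [solution_alt]
    rw [hcnt, hrep, pvOuter_eq]
    simp
  rw [hA, hB, heq]
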